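-- pv_equiv track=rewrite | github.com/startupbuilders777/Algorithms-Data-Structures-and-Design | Algorithms/Algorithms Class/ArraySumDivisibility.py | divisible_integers
-- ===== SOURCE A (Python) =====
-- def divisible_integers(arr):
--     cumulative_sum = []
--     sum = 0
--     cumulative_sum.append(sum)
--     for i in range(len(arr)):
--         sum += arr[i]
--         cumulative_sum.append(sum)
--
--
--     # print cumulative_sum
--     a = 0
--
--     input_arr_length = len(arr)
--
--     while a < input_arr_length:
--         b = a + 1
--         while b < input_arr_length:
--             range_sum = cumulative_sum[b+1] - cumulative_sum[a]
--             divisor = b - a + 1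
--             # print range_sum
--             if divisor != 1 and (range_sum % divisor) == 0:
--                 return True
--
--             b += 1
--
--         a += 1
--
--
--     return False
-- ===== SOURCE B (Python) =====
-- def divisible_integers(arr):
--     n = len(arr)
--     for length in range(2, n + 1):
--         s = sum(arr[:length])
--         if s % length == 0:
--             return True
--         for i in range(length, n):
--             s += arr[i] - arr[i - length]
--             if s % length == 0:
--                 return True
--     return False
-- ===== Notes on version B (the rewrite author's own statement) =====
-- stated objective: alternative
-- what changed: Replaces the prefix-sum table with nested start/end index loops by an outer loop over window lengths with an O(1)-update sliding-window sum per length, which checks all length-2 windows first and so exits early without building the cumulative table.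
import Mathlib
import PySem

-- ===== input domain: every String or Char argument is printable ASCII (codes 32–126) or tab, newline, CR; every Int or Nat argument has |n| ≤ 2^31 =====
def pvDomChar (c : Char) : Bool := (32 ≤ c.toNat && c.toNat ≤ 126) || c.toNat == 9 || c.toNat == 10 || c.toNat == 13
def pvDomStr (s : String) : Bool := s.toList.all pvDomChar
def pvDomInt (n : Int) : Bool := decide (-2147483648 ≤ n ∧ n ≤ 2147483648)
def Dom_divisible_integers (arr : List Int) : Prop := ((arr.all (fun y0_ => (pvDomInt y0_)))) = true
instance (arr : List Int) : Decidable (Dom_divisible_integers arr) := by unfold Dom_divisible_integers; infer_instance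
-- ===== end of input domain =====

-- B replaces A's prefix-sum table and start/end index loops by an outer loop over
-- window lengths maintaining a single sliding-window sum (alternative algorithm, same O(n^2)).

-- ===== PORT A =====
-- `for i in range(len(arr)): sum += arr[i]; cumulative_sum.append(sum)` as a foldl over arr
-- (the loop reads exactly the elements of arr in order, so this is exact).
def csBuild (arr : List Int) : List Int :=
  (arr.foldl (fun (p : List Int × Int) x => (p.1 ++ [p.2 + x], p.2 + x)) (([0] : List Int), (0 : Int))).1

-- The two while-loops run a over range(n) and b over range(a+1, n) with early `return True`,
-- ported as `any` over the same (nonnegative) index ranges; all list indices are in range,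
-- so `List.getD` is exact for the Python indexing.
def divisible_integers (arr : List Int) : Bool :=
  let cs := csBuild arr
  let n := arr.length
  (List.range n).any fun a =>
    (List.range' (a + 1) (n - (a + 1))).any fun b =>
      let range_sum := cs.getD (b + 1) 0 - cs.getD a 0
      let divisor : Int := (b : Int) - (a : Int) + 1
      (divisor != 1) && (PySem.Int.mod range_sum divisor == 0)

-- ===== PORT B =====
-- inner `for i in range(length, n)` with running sum and early `return True`
def slideB (arr : List Int) (ℓ : Nat) (s : Int) (i : Nat) : Bool :=
  if h : i < arr.length then
    let s' := s + arr.getD i 0 - arr.getD (i - ℓ) 0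
    if PySem.Int.mod s' (ℓ : Int) == 0 then true else slideB arr ℓ s' (i + 1)
  else false
termination_by arr.length - i

-- outer `for length in range(2, n+1)`; `sum(arr[:length])` is the foldl over the prefix.
def divisible_integers_alt (arr : List Int) : Bool :=
  let n := arr.length
  (List.range' 2 (n - 1)).any fun ℓ =>
    let s := (arr.take ℓ).foldl (· + ·) 0
    (PySem.Int.mod s (ℓ : Int) == 0) || slideB arr ℓ s ℓ

-- ===== PRECONDITION & SPEC =====
def Spec_divisible_integers (arr : List Int) (out : Bool) : Prop := out = divisible_integers_alt arr
instance (arr : List Int) (out : Bool) : Decidable (Spec_divisible_integers arr out) := by unfold Spec_divisible_integers; infer_instance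

-- ===== CLAIM (what is proved, stated in full; the proofs are below) =====
def Claim_equal_divisible_integers : Prop := ∀ (arr : List Int), Dom_divisible_integers arr → Spec_divisible_integers arr (divisible_integers arr)

-- ===== LEMMAS AND PROOFS =====

-- prefix sum of the first k elements
def pfx (arr : List Int) (k : Nat) : Int := (arr.take k).sum

-- both programs decide this proposition: some window of length ≥ 2 has sum divisible by its length
def Q (arr : List Int) : Prop :=
  ∃ ℓ a : Nat, 2 ≤ ℓ ∧ a + ℓ ≤ arr.length ∧
    PySem.Int.mod (pfx arr (a + ℓ) - pfx arr a) (ℓ : Int) = 0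

lemma pfx_succ (arr : List Int) (k : Nat) (h : k < arr.length) :
    pfx arr (k + 1) = pfx arr k + arr.getD k 0 := by
  unfold pfx
  rw [List.take_add_one, List.sum_append, List.getElem?_eq_getElem h]
  simp [List.getD_eq_getElem?_getD, List.getElem?_eq_getElem h]

lemma csBuild_go (xs : List Int) : ∀ (acc : List Int) (s : Int),
    (xs.foldl (fun (p : List Int × Int) x => (p.1 ++ [p.2 + x], p.2 + x)) (acc, s)).1 =
      acc ++ (List.range xs.length).map (fun k => s + (xs.take (k + 1)).sum) := by
  induction xs with
  | nil => simp
  | cons x t ih =>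
    intro acc s
    rw [List.foldl_cons, ih]
    simp [List.range_succ_eq_map, Function.comp_def, add_assoc]

lemma cs_getD (arr : List Int) (k : Nat) (hk : k ≤ arr.length) :
    (csBuild arr).getD k 0 = pfx arr k := by
  unfold csBuild
  rw [csBuild_go]
  cases k with
  | zero => simp [pfx]
  | succ j =>
    have hj : j < arr.length := by omega
    simp [List.getD_eq_getElem?_getD, List.getElem?_map,
      List.getElem?_range hj, pfx]

lemma A_iff (arr : List Int) : divisible_integers arr = true ↔ Q arr := by
  simp only [divisible_integers, List.any_eq_true, List.mem_range, List.mem_range'_1,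
    Bool.and_eq_true, bne_iff_ne, beq_iff_eq]
  constructor
  · rintro ⟨a, ha, b, ⟨hab, hb⟩, _, hmod⟩
    have hb' : b < arr.length := by omega
    refine ⟨b + 1 - a, a, by omega, by omega, ?_⟩
    have h1 : a + (b + 1 - a) = b + 1 := by omega
    have h2 : ((b + 1 - a : Nat) : Int) = (b : Int) - (a : Int) + 1 := by omega
    rw [h1, h2, ← cs_getD arr (b + 1) (by omega), ← cs_getD arr a (by omega)]
    exact hmod
  · rintro ⟨ℓ, a, hℓ, hle, hmod⟩
    refine ⟨a, by omega, a + ℓ - 1, ⟨by omega, by omega⟩, by omega, ?_⟩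
    have h1 : a + ℓ - 1 + 1 = a + ℓ := by omega
    have h2 : ((a + ℓ - 1 : Nat) : Int) - (a : Int) + 1 = ((ℓ : Nat) : Int) := by omega
    rw [h1, h2, cs_getD arr (a + ℓ) hle, cs_getD arr a (by omega)]
    exact hmod

lemma slide_iff (arr : List Int) (ℓ : Nat) (hℓ : 1 ≤ ℓ) (a₀ : Nat) :
    slideB arr ℓ (pfx arr (a₀ + ℓ) - pfx arr a₀) (a₀ + ℓ) = true ↔
      ∃ a, a₀ < a ∧ a + ℓ ≤ arr.length ∧
        PySem.Int.mod (pfx arr (a + ℓ) - pfx arr a) (ℓ : Int) = 0 := by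
  suffices H : ∀ (k a₀ : Nat), arr.length - (a₀ + ℓ) = k →
      (slideB arr ℓ (pfx arr (a₀ + ℓ) - pfx arr a₀) (a₀ + ℓ) = true ↔
        ∃ a, a₀ < a ∧ a + ℓ ≤ arr.length ∧
          PySem.Int.mod (pfx arr (a + ℓ) - pfx arr a) (ℓ : Int) = 0) by
    exact H _ a₀ rfl
  intro k
  induction k with
  | zero =>
    intro a₀ hk
    rw [slideB]
    have h : ¬ (a₀ + ℓ < arr.length) := by omega
    simp only [h, dif_neg, not_false_iff]
    constructor
    · intro hfalse; exact absurd hfalse (by simp)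
    · rintro ⟨a, ha, hle, _⟩; omega
  | succ k ih =>
    intro a₀ hk
    have hlt : a₀ + ℓ < arr.length := by omega
    rw [slideB]
    simp only [hlt, dif_pos]
    have hsub : a₀ + ℓ - ℓ = a₀ := by omega
    have hs' : pfx arr (a₀ + ℓ) - pfx arr a₀ + arr.getD (a₀ + ℓ) 0 - arr.getD (a₀ + ℓ - ℓ) 0
        = pfx arr (a₀ + 1 + ℓ) - pfx arr (a₀ + 1) := by
      have e1 := pfx_succ arr (a₀ + ℓ) hlt
      have e2 := pfx_succ arr a₀ (by omega)
      have h3 : a₀ + 1 + ℓ = a₀ + ℓ + 1 := by omega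
      rw [hsub, h3, e1, e2]; ring
    rw [hs']
    by_cases hm : PySem.Int.mod (pfx arr (a₀ + 1 + ℓ) - pfx arr (a₀ + 1)) (ℓ : Int) = 0
    · simp only [hm, beq_self_eq_true, if_pos]
      constructor
      · intro _; exact ⟨a₀ + 1, by omega, by omega, hm⟩
      · intro _; trivial
    · have hbeq : (PySem.Int.mod (pfx arr (a₀ + 1 + ℓ) - pfx arr (a₀ + 1)) (ℓ : Int) == 0) = false := by
        simpa using hm
      simp only [hbeq, if_false, Bool.false_eq_true]
      have h3 : a₀ + ℓ + 1 = a₀ + 1 + ℓ := by omega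
      rw [h3, ih (a₀ + 1) (by omega)]
      constructor
      · rintro ⟨a, ha, hle, hmod⟩; exact ⟨a, by omega, hle, hmod⟩
      · rintro ⟨a, ha, hle, hmod⟩
        rcases Nat.lt_or_ge (a₀ + 1) a with h | h
        · exact ⟨a, h, hle, hmod⟩
        · have : a = a₀ + 1 := by omega
          subst this; exact absurd hmod hm

lemma B_iff (arr : List Int) : divisible_integers_alt arr = true ↔ Q arr := by
  simp only [divisible_integers_alt, List.any_eq_true, List.mem_range'_1,
    Bool.or_eq_true, beq_iff_eq]
  constructor
  · rintro ⟨ℓ, ⟨hℓ, hub⟩, hcase⟩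
    have hs0 : (arr.take ℓ).foldl (· + ·) 0 = pfx arr (0 + ℓ) - pfx arr 0 := by
      simp [pfx, List.sum_eq_foldl]
    rcases hcase with hmod | hslide
    · exact ⟨ℓ, 0, hℓ, by omega, by rw [Nat.zero_add] at *; simpa [pfx, List.sum_eq_foldl] using hmod⟩
    · rw [hs0] at hslide
      have := (slide_iff arr ℓ (by omega) 0).mp (by simpa using hslide)
      rcases this with ⟨a, _, hle, hmod⟩
      exact ⟨ℓ, a, hℓ, hle, hmod⟩
  · rintro ⟨ℓ, a, hℓ, hle, hmod⟩
    refine ⟨ℓ, ⟨hℓ, by omega⟩, ?_⟩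
    have hs0 : (arr.take ℓ).foldl (· + ·) 0 = pfx arr (0 + ℓ) - pfx arr 0 := by
      simp [pfx, List.sum_eq_foldl]
    cases a with
    | zero =>
      left; rw [← Nat.zero_add ℓ] ; simpa [pfx, List.sum_eq_foldl] using hmod
    | succ j =>
      right
      rw [hs0]
      have : slideB arr ℓ (pfx arr (0 + ℓ) - pfx arr 0) (0 + ℓ) = true :=
        (slide_iff arr ℓ (by omega) 0).mpr ⟨j + 1, by omega, hle, hmod⟩
      simpa using this

-- ===== VERDICT (by name: the statement is the Claim_ definition above) =====
theorem divisible_integers_spec : Claim_equal_divisible_integers := by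
  intro arr _
  unfold Spec_divisible_integers
  exact Bool.eq_iff_iff.mpr ((A_iff arr).trans (B_iff arr).symm)
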